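-- pv_equiv track=rewrite | github.com/DJShankyShoe/Netsys | latencyTester.py | process_latencies
-- ===== SOURCE A (Python) =====
-- def process_latencies(latencies, time_num):
--     valid_dict = {}
--     invalid_dict = {}
--     current_val = 0
--
--     # Process latency data into valid and invalid categories for smoothing function
--     for i, latency in enumerate(latencies):
--         if latency is None:
--             # If latency is None, it means the host is unreachable, add it to the invalid dictionary
--             if current_val not in invalid_dict:
--                 invalid_dict[current_val] = [[], []] # array 1 - latency, array 2 - time
--             invalid_dict[current_val][0].append(0)
--             invalid_dict[current_val][1].append(time_num[i])
--         else:
--             # If latency is a valid number, add it to the valid dictionary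
--             if current_val not in valid_dict:
--                 valid_dict[current_val] = [[], []] # array 1 - latency, array 2 - time
--             valid_dict[current_val][0].append(latency)
--             valid_dict[current_val][1].append(time_num[i])
--
--         # Check if the next latency is of a different type (valid/invalid), increment currentVal to start a new segment
--         if i + 1 < len(latencies) and type(latency) != type(latencies[i + 1]):
--             current_val = i + 1
--
--     return valid_dict, invalid_dict
-- ===== SOURCE B (Python) =====
-- def process_latencies(latencies, time_num):
--     # Two-phase: first find the [start, end) boundaries of each maximal run of
--     # same-typed entries (A's boundary test is type-based, so int/float/None all
--     # split runs), then fill both dicts run by run.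
--     n = len(latencies)
--     runs = []
--     i = 0
--     while i < n:
--         j = i + 1
--         while j < n and type(latencies[j]) == type(latencies[i]):
--             j += 1
--         runs.append((i, j))
--         i = j
--     valid_dict = {}
--     invalid_dict = {}
--     for s, e in runs:
--         times = [time_num[k] for k in range(s, e)]
--         if latencies[s] is None:
--             invalid_dict[s] = [[0] * (e - s), times]
--         else:
--             valid_dict[s] = [list(latencies[s:e]), times]
--     return valid_dict, invalid_dict
-- ===== Notes on version B (the rewrite author's own statement) =====
-- stated objective: alternative
-- what changed: Replaces A's single stateful pass (current_val lookahead with per-element dict membership tests, inits and appends) by a two-phase structure: first compute the [start,end) boundaries of each maximal run of same-typed entries (the same type-based boundary A uses, so mixed int/float lists segment identically), then build each dict entry in one shot per run from slices/replication; Pre_ excludes only inputs where A raises IndexError (latencies longer than time_num), where B raises too.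
import Mathlib
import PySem

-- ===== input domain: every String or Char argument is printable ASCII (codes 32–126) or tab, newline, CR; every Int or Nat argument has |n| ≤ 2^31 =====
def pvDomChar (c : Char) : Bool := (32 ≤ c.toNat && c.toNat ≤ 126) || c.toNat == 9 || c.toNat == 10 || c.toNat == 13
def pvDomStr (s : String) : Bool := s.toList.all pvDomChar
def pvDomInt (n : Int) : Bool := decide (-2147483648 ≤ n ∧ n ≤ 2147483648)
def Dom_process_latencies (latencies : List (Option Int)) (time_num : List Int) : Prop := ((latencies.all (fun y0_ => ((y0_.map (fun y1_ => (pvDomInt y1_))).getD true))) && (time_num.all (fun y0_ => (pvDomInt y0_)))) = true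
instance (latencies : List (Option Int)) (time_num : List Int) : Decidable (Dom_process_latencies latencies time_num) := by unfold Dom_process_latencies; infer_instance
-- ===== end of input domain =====

-- B restructures A's single stateful pass into run-boundary detection followed by per-run dict filling
-- (objective: alternative decomposition, same O(n) cost); equivalence is about the return value.
-- Both Pythons compare type(x); on this domain (Option Int) type equality is isNone equality.

-- ===== PORT A =====
-- the for-loop over enumerate(latencies): state (valid, invalid, current_val), index i; time_num[i]
-- is PySem.List.pyGetD (in range exactly under Pre_, where Python does not raise IndexError)
def pvAloop (time_num : List Int) (valid invalid : PySem.Dict Int (List (List Int))) (cur : Int)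
    (i : Nat) : List (Option Int) → PySem.Dict Int (List (List Int)) × PySem.Dict Int (List (List Int))
  | [] => (valid, invalid)
  | latency :: rest =>
    let st :=
      match latency with
      | none =>
        -- if current_val not in invalid_dict: invalid_dict[current_val] = [[], []]; then the two appends
        let inv := if invalid.contains cur then invalid else invalid.insert cur [[], []]
        (valid, inv.modify cur [[], []]
          (fun v => [v.getD 0 [] ++ [0], v.getD 1 [] ++ [PySem.List.pyGetD time_num (i : Int) 0]]))
      | some lat =>
        let vd := if valid.contains cur then valid else valid.insert cur [[], []]
        (vd.modify cur [[], []]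
          (fun v => [v.getD 0 [] ++ [lat], v.getD 1 [] ++ [PySem.List.pyGetD time_num (i : Int) 0]]), invalid)
    -- if i + 1 < len(latencies) and type(latency) != type(latencies[i+1]): current_val = i + 1
    -- (type(x) on Option Int is NoneType vs int, i.e. isNone)
    let cur' :=
      match rest with
      | [] => cur
      | nxt :: _ => if latency.isNone ≠ nxt.isNone then ((i : Int) + 1) else cur
    pvAloop time_num st.1 st.2 cur' (i + 1) rest

def process_latencies (latencies : List (Option Int)) (time_num : List Int) :
    (List (Int × List (List Int))) × (List (Int × List (List Int))) :=
  let st := pvAloop time_num PySem.Dict.empty PySem.Dict.empty 0 0 latencies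
  (st.1.items, st.2.items)

-- ===== PORT B =====
-- inner while: advance j while type(latencies[j]) == type(latencies[i]); the run head's type is
-- recorded as t = isNone (on Option Int, type equality is isNone equality)
def pvBend (latencies : List (Option Int)) (t : Bool) (j : Nat) : Nat :=
  if h : j < latencies.length ∧ (PySem.List.pyGetD latencies (j : Int) none).isNone = t
  then pvBend latencies t (j + 1) else j
termination_by latencies.length - j
decreasing_by exact Nat.sub_succ_lt_self latencies.length j h.1

-- needed for pvBruns' termination
theorem pvBend_ge (latencies : List (Option Int)) (t : Bool) (j : Nat) : j ≤ pvBend latencies t j := by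
  rw [pvBend]
  split
  next h => exact Nat.le_trans (Nat.le_succ j) (pvBend_ge latencies t (j + 1))
  next => exact Nat.le_refl j
termination_by latencies.length - j
decreasing_by exact Nat.sub_succ_lt_self latencies.length j (by assumption : j < latencies.length ∧ (PySem.List.pyGetD latencies (j : Int) none).isNone = t).1

-- outer while: collect the (start, end) pairs of the maximal runs
def pvBruns (latencies : List (Option Int)) (i : Nat) : List (Nat × Nat) :=
  if h : i < latencies.length then
    (i, pvBend latencies (PySem.List.pyGetD latencies (i : Int) none).isNone (i + 1)) ::
      pvBruns latencies (pvBend latencies (PySem.List.pyGetD latencies (i : Int) none).isNone (i + 1))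
  else []
termination_by latencies.length - i
decreasing_by exact Nat.sub_lt_sub_left h (pvBend_ge latencies (PySem.List.pyGetD latencies (i : Int) none).isNone (i + 1))

-- the for s, e in runs loop (valid runs hold ints only, so Option.getD 0 is never the default)
def pvBfill (latencies : List (Option Int)) (time_num : List Int)
    (st : PySem.Dict Int (List (List Int)) × PySem.Dict Int (List (List Int)))
    (runs : List (Nat × Nat)) : PySem.Dict Int (List (List Int)) × PySem.Dict Int (List (List Int)) :=
  runs.foldl (fun st se =>
    let times := (PySem.List.pyRange (se.1 : Int) (se.2 : Int) 1).map
      (fun k => PySem.List.pyGetD time_num k 0)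
    if (PySem.List.pyGetD latencies (se.1 : Int) none).isNone then
      (st.1, st.2.insert (se.1 : Int) [List.replicate (se.2 - se.1) 0, times])
    else
      (st.1.insert (se.1 : Int)
        [(PySem.List.slice latencies (some (se.1 : Int)) (some (se.2 : Int))).map (fun o => o.getD 0),
          times], st.2)) st

def process_latencies_alt (latencies : List (Option Int)) (time_num : List Int) :
    (List (Int × List (List Int))) × (List (Int × List (List Int))) :=
  let st := pvBfill latencies time_num (PySem.Dict.empty, PySem.Dict.empty) (pvBruns latencies 0)
  (st.1.items, st.2.items)

-- ===== PRECONDITION & SPEC =====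
-- A raises IndexError (time_num[i]) exactly when latencies is longer than time_num; nothing else raises.
def Pre_process_latencies (latencies : List (Option Int)) (time_num : List Int) : Prop :=
  latencies.length ≤ time_num.length
instance (latencies : List (Option Int)) (time_num : List Int) : Decidable (Pre_process_latencies latencies time_num) := by unfold Pre_process_latencies; infer_instance
def pvWitness_process_latencies : List (Option Int) × List Int := ([some 1, none, none, some 4], [10, 20, 30, 40])

def Spec_process_latencies (latencies : List (Option Int)) (time_num : List Int) (out : (List (Int × List (List Int))) × (List (Int × List (List Int)))) : Prop := out = process_latencies_alt latencies time_num
instance (latencies : List (Option Int)) (time_num : List Int) (out : (List (Int × List (List Int))) × (List (Int × List (List Int)))) : Decidable (Spec_process_latencies latencies time_num out) := by unfold Spec_process_latencies; infer_instance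

-- ===== CLAIM (what is proved, stated in full; the proofs are below) =====
def Claim_equal_process_latencies : Prop := ∀ (latencies : List (Option Int)) (time_num : List Int), Dom_process_latencies latencies time_num → Pre_process_latencies latencies time_num → Spec_process_latencies latencies time_num (process_latencies latencies time_num)

-- ===== LEMMAS AND PROOFS =====

theorem pvBend_le (latencies : List (Option Int)) (t : Bool) (j : Nat) (h : j ≤ latencies.length) :
    pvBend latencies t j ≤ latencies.length := by
  rw [pvBend]
  split
  next hc => exact pvBend_le latencies t (j + 1) hc.1
  next => exact h
termination_by latencies.length - j
decreasing_by omega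

theorem pvBend_mid (latencies : List (Option Int)) (t : Bool) (j : Nat) :
    ∀ m, j ≤ m → m < pvBend latencies t j →
      (PySem.List.pyGetD latencies (m : Int) none).isNone = t := by
  intro m hjm hm
  rw [pvBend] at hm
  split at hm
  next hc =>
    rcases Nat.eq_or_lt_of_le hjm with rfl | hlt
    · exact hc.2
    · exact pvBend_mid latencies t (j + 1) m hlt hm
  next => omega
termination_by latencies.length - j
decreasing_by omega

theorem pvBend_stop (latencies : List (Option Int)) (t : Bool) (j : Nat)
    (h : pvBend latencies t j < latencies.length) :
    (PySem.List.pyGetD latencies ((pvBend latencies t j : Nat) : Int) none).isNone ≠ t := by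
  by_cases hc : j < latencies.length ∧ (PySem.List.pyGetD latencies (j : Int) none).isNone = t
  · rw [pvBend, dif_pos hc] at h ⊢
    exact pvBend_stop latencies t (j + 1) h
  · rw [pvBend, dif_neg hc] at h ⊢
    intro ht
    exact hc ⟨h, ht⟩
termination_by latencies.length - j
decreasing_by omega

-- one Python element-step on a dict collapses to a single insert
theorem pvStepDict (d : PySem.Dict Int (List (List Int))) (k : Int) (f : List (List Int) → List (List Int)) :
    (if d.contains k then d else d.insert k [[], []]).modify k [[], []] f
      = d.insert k (f (d.getD k [[], []])) := by
  by_cases hc : d.contains k = true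
  · rw [if_pos hc]
    rfl
  · rw [if_neg hc]
    show (d.insert k [[], []]).insert k (f ((d.insert k [[], []]).getD k [[], []])) = _
    rw [PySem.Dict.getD_insert_self, PySem.Dict.insert_insert_self,
      PySem.Dict.getD_of_not_contains d _ (Bool.eq_false_iff.mpr hc)]

-- single-step unfoldings of pvAloop, with the lookahead phrased via head?
theorem pvAloop_cons_none (time : List Int) (valid invalid : PySem.Dict Int (List (List Int)))
    (cur : Int) (i : Nat) (tl : List (Option Int)) :
    pvAloop time valid invalid cur i (none :: tl) =
      pvAloop time valid
        (invalid.insert cur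
          [(invalid.getD cur [[], []]).getD 0 [] ++ [0],
           (invalid.getD cur [[], []]).getD 1 [] ++ [PySem.List.pyGetD time (i : Int) 0]])
        (match tl.head? with
         | some nxt => if true ≠ nxt.isNone then (i : Int) + 1 else cur
         | none => cur) (i + 1) tl := by
  cases tl with
  | nil => simp [pvAloop, pvStepDict]
  | cons nxt tl' => cases nxt <;> simp [pvAloop, pvStepDict]

theorem pvAloop_cons_some (time : List Int) (valid invalid : PySem.Dict Int (List (List Int)))
    (cur : Int) (i : Nat) (x : Int) (tl : List (Option Int)) :
    pvAloop time valid invalid cur i (some x :: tl) =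
      pvAloop time
        (valid.insert cur
          [(valid.getD cur [[], []]).getD 0 [] ++ [x],
           (valid.getD cur [[], []]).getD 1 [] ++ [PySem.List.pyGetD time (i : Int) 0]])
        invalid
        (match tl.head? with
         | some nxt => if false ≠ nxt.isNone then (i : Int) + 1 else cur
         | none => cur) (i + 1) tl := by
  cases tl with
  | nil => simp [pvAloop, pvStepDict]
  | cons nxt tl' => cases nxt <;> simp [pvAloop, pvStepDict]

-- pyRange over [s, s+n) as a mapped List.range
theorem pvRangeMap {α : Type} (f : Int → α) (s n : Nat) :
    (PySem.List.pyRange (s : Int) ((s + n : Nat) : Int) 1).map f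
      = (List.range n).map (fun m => f ((s + m : Nat) : Int)) := by
  induction n generalizing s with
  | zero => simp [PySem.List.pyRange]
  | succ n ih =>
    have h1 : (s : Int) < ((s + (n + 1) : Nat) : Int) := by push_cast; omega
    have h3 : ((s + (n + 1) : Nat) : Int) = ((s + 1 + n : Nat) : Int) := by push_cast; ring
    have h2 : (s : Int) + 1 = ((s + 1 : Nat) : Int) := by push_cast; ring
    rw [PySem.List.pyRange_one_cons h1, List.map_cons, h2, h3, ih (s + 1),
      List.range_succ_eq_map, List.map_cons, List.map_map]
    refine congrArg₂ _ (by norm_num) (List.map_congr_left ?_)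
    intro m _
    simp only [Function.comp]
    congr 1
    omega

-- a slice of an in-range segment, element by element
theorem pvSliceMap (lat : List (Option Int)) (s n : Nat) (h : s + n ≤ lat.length) :
    (lat.drop s).take n = (List.range n).map (fun m => lat.getD (s + m) none) := by
  apply List.ext_getElem
  · simp
    omega
  · intro m h1 h2
    have hm : s + m < lat.length := by simp at h1; omega
    simp [List.getElem_take, List.getElem_drop, List.getElem?_eq_getElem hm]

-- processing one maximal None-run [k, k+n+1)
theorem pvA_run_none (time : List Int) (lat : List (Option Int)) (i : Int) :
    ∀ (n k : Nat) (valid invalid : PySem.Dict Int (List (List Int))),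
    k + n + 1 ≤ lat.length →
    (∀ m, k ≤ m → m < k + n + 1 → (PySem.List.pyGetD lat (m : Int) none).isNone = true) →
    (k + n + 1 = lat.length ∨ (PySem.List.pyGetD lat ((k + n + 1 : Nat) : Int) none).isNone = false) →
    pvAloop time valid invalid i k (lat.drop k)
      = pvAloop time valid
          (invalid.insert i
            [(invalid.getD i [[], []]).getD 0 [] ++ List.replicate (n + 1) 0,
             (invalid.getD i [[], []]).getD 1 [] ++ (List.range (n + 1)).map (fun m => time.getD (k + m) 0)])
          ((k + n + 1 : Nat) : Int) (k + n + 1) (lat.drop (k + n + 1)) := by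
  intro n
  induction n with
  | zero =>
    intro k valid invalid hlen hrun hstop
    have hk : k < lat.length := by omega
    have hgk : lat[k] = none := by
      have h := hrun k le_rfl (by omega)
      simp only [PySem.List.pyGetD_natCast, List.getD_eq_getElem _ _ hk,
        Option.isNone_iff_eq_none] at h
      exact h
    rw [List.drop_eq_getElem_cons hk, hgk, pvAloop_cons_none]
    by_cases hk1 : k + 1 < lat.length
    · have hg1 : lat[k + 1].isNone = false := by
        rcases hstop with h | h
        · omega
        · simp only [Nat.add_zero] at h
          simp only [PySem.List.pyGetD_natCast, List.getD_eq_getElem _ _ hk1] at h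
          exact h
      simp only [List.head?_drop, List.getElem?_eq_getElem hk1, hg1]
      norm_num [List.range_one, PySem.List.pyGetD_natCast]
    · have hke : k + 1 = lat.length := by omega
      have hend : lat.drop (k + 1) = [] := List.drop_eq_nil_of_le (by omega)
      rw [hend]
      simp only [List.head?_nil, Nat.add_zero]
      rw [show lat.drop (k + 1) = [] from hend] at *
      simp only [pvAloop]
      norm_num [List.range_one, PySem.List.pyGetD_natCast]
  | succ n ih =>
    intro k valid invalid hlen hrun hstop
    have hk : k < lat.length := by omega
    have hk1 : k + 1 < lat.length := by omega
    have hgk : lat[k] = none := by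
      have h := hrun k le_rfl (by omega)
      simp only [PySem.List.pyGetD_natCast, List.getD_eq_getElem _ _ hk,
        Option.isNone_iff_eq_none] at h
      exact h
    have hg1 : lat[k + 1].isNone = true := by
      have h := hrun (k + 1) (by omega) (by omega)
      simp only [PySem.List.pyGetD_natCast, List.getD_eq_getElem _ _ hk1] at h
      exact h
    rw [List.drop_eq_getElem_cons hk, hgk, pvAloop_cons_none]
    simp only [List.head?_drop, List.getElem?_eq_getElem hk1, hg1, ne_eq, not_true_eq_false,
      if_false]
    have hrun' : ∀ m, k + 1 ≤ m → m < k + 1 + n + 1 →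
        (PySem.List.pyGetD lat (m : Int) none).isNone = true := by
      intro m h1 h2
      exact hrun m (by omega) (by omega)
    have hstop' : k + 1 + n + 1 = lat.length ∨
        (PySem.List.pyGetD lat ((k + 1 + n + 1 : Nat) : Int) none).isNone = false := by
      rw [show k + 1 + n + 1 = k + (n + 1) + 1 from by omega]
      exact hstop
    rw [ih (k + 1) valid _ (by omega) hrun' hstop',
      PySem.Dict.getD_insert_self, PySem.Dict.insert_insert_self]
    rw [show k + 1 + n + 1 = k + (n + 1) + 1 from by omega]
    simp only [PySem.List.pyGetD_natCast, List.getD_eq_getElem?_getD,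
      List.replicate_succ, List.range_succ_eq_map, List.map_cons,
      List.map_map, Function.comp_def, Nat.succ_eq_add_one, Nat.add_zero,
      List.getElem?_cons_zero, List.getElem?_cons_succ]
    ring_nf
    simp [List.append_assoc]

-- processing one maximal valid-run [k, k+n+1)
theorem pvA_run_some (time : List Int) (lat : List (Option Int)) (i : Int) :
    ∀ (n k : Nat) (valid invalid : PySem.Dict Int (List (List Int))),
    k + n + 1 ≤ lat.length →
    (∀ m, k ≤ m → m < k + n + 1 → (PySem.List.pyGetD lat (m : Int) none).isNone = false) →
    (k + n + 1 = lat.length ∨ (PySem.List.pyGetD lat ((k + n + 1 : Nat) : Int) none).isNone = true) →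
    pvAloop time valid invalid i k (lat.drop k)
      = pvAloop time
          (valid.insert i
            [(valid.getD i [[], []]).getD 0 [] ++ (List.range (n + 1)).map (fun m => (lat.getD (k + m) none).getD 0),
             (valid.getD i [[], []]).getD 1 [] ++ (List.range (n + 1)).map (fun m => time.getD (k + m) 0)])
          invalid ((k + n + 1 : Nat) : Int) (k + n + 1) (lat.drop (k + n + 1)) := by
  intro n
  induction n with
  | zero =>
    intro k valid invalid hlen hrun hstop
    have hk : k < lat.length := by omega
    obtain ⟨x, hgk⟩ : ∃ x, lat[k] = some x := by
      have h := hrun k le_rfl (by omega)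
      simp only [PySem.List.pyGetD_natCast, List.getD_eq_getElem?_getD,
        List.getElem?_eq_getElem hk, Option.getD_some] at h
      cases hx : lat[k] with
      | none => rw [hx] at h; simp at h
      | some v => exact ⟨v, rfl⟩
    rw [List.drop_eq_getElem_cons hk, hgk, pvAloop_cons_some]
    by_cases hk1 : k + 1 < lat.length
    · have hg1 : lat[k + 1].isNone = true := by
        rcases hstop with h | h
        · omega
        · simp only [Nat.add_zero] at h
          simp only [PySem.List.pyGetD_natCast, List.getD_eq_getElem?_getD,
            List.getElem?_eq_getElem hk1, Option.getD_some] at h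
          exact h
      simp only [List.head?_drop, List.getElem?_eq_getElem hk1, hg1]
      norm_num [List.range_one, PySem.List.pyGetD_natCast, List.getD_eq_getElem?_getD,
        List.getElem?_eq_getElem hk, hgk]
    · have hend : lat.drop (k + 1) = [] := List.drop_eq_nil_of_le (by omega)
      rw [show lat.drop (k + 1) = [] from hend] at *
      simp only [List.head?_nil, Nat.add_zero]
      simp only [pvAloop]
      norm_num [List.range_one, PySem.List.pyGetD_natCast, List.getD_eq_getElem?_getD,
        List.getElem?_eq_getElem hk, hgk]
  | succ n ih =>
    intro k valid invalid hlen hrun hstop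
    have hk : k < lat.length := by omega
    have hk1 : k + 1 < lat.length := by omega
    obtain ⟨x, hgk⟩ : ∃ x, lat[k] = some x := by
      have h := hrun k le_rfl (by omega)
      simp only [PySem.List.pyGetD_natCast, List.getD_eq_getElem?_getD,
        List.getElem?_eq_getElem hk, Option.getD_some] at h
      cases hx : lat[k] with
      | none => rw [hx] at h; simp at h
      | some v => exact ⟨v, rfl⟩
    have hg1 : lat[k + 1].isNone = false := by
      have h := hrun (k + 1) (by omega) (by omega)
      simp only [PySem.List.pyGetD_natCast, List.getD_eq_getElem?_getD,
        List.getElem?_eq_getElem hk1, Option.getD_some] at h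
      exact h
    rw [List.drop_eq_getElem_cons hk, hgk, pvAloop_cons_some]
    simp only [List.head?_drop, List.getElem?_eq_getElem hk1, hg1, ne_eq, not_true_eq_false, if_false]
    have hrun' : ∀ m, k + 1 ≤ m → m < k + 1 + n + 1 →
        (PySem.List.pyGetD lat (m : Int) none).isNone = false := by
      intro m h1 h2
      exact hrun m (by omega) (by omega)
    have hstop' : k + 1 + n + 1 = lat.length ∨
        (PySem.List.pyGetD lat ((k + 1 + n + 1 : Nat) : Int) none).isNone = true := by
      rw [show k + 1 + n + 1 = k + (n + 1) + 1 from by omega]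
      exact hstop
    rw [ih (k + 1) _ invalid (by omega) hrun' hstop',
      PySem.Dict.getD_insert_self, PySem.Dict.insert_insert_self]
    rw [show k + 1 + n + 1 = k + (n + 1) + 1 from by omega]
    simp only [PySem.List.pyGetD_natCast, List.getD_eq_getElem?_getD, List.append_assoc,
      List.singleton_append, List.range_succ_eq_map, List.map_cons,
      List.map_map, Function.comp_def, Nat.succ_eq_add_one, Nat.add_zero,
      List.getElem?_cons_zero, List.getElem?_cons_succ, List.getElem?_eq_getElem hk, hgk,
      Option.getD_some]
    ring_nf

theorem pvMain (time : List Int) (lat : List (Option Int)) (i : Nat)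
    (valid invalid : PySem.Dict Int (List (List Int)))
    (hi : i ≤ lat.length)
    (hv : ∀ m : Nat, i ≤ m → valid.contains (m : Int) = false)
    (hiv : ∀ m : Nat, i ≤ m → invalid.contains (m : Int) = false) :
    pvAloop time valid invalid (i : Int) i (lat.drop i)
      = pvBfill lat time (valid, invalid) (pvBruns lat i) := by
  by_cases hlt : i < lat.length
  · obtain ⟨n, hn⟩ : ∃ n, pvBend lat (PySem.List.pyGetD lat (i : Int) none).isNone (i + 1) = i + (n + 1) := by
      have h := pvBend_ge lat (PySem.List.pyGetD lat (i : Int) none).isNone (i + 1)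
      exact ⟨pvBend lat (PySem.List.pyGetD lat (i : Int) none).isNone (i + 1) - i - 1, by omega⟩
    have hj2 : i + (n + 1) ≤ lat.length := by
      have := pvBend_le lat (PySem.List.pyGetD lat (i : Int) none).isNone (i + 1) (by omega)
      omega
    have hrun : ∀ m, i ≤ m → m < i + (n + 1) →
        (PySem.List.pyGetD lat (m : Int) none).isNone
          = (PySem.List.pyGetD lat (i : Int) none).isNone := by
      intro m h1 h2
      rcases Nat.eq_or_lt_of_le h1 with rfl | h1
      · rfl
      · exact pvBend_mid lat _ (i + 1) m h1 (by omega)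
    have hstop0 : i + (n + 1) < lat.length →
        (PySem.List.pyGetD lat ((i + (n + 1) : Nat) : Int) none).isNone
          ≠ (PySem.List.pyGetD lat (i : Int) none).isNone := by
      intro hlt2
      have h := pvBend_stop lat (PySem.List.pyGetD lat (i : Int) none).isNone (i + 1)
        (by rw [hn]; exact hlt2)
      rwa [hn] at h
    have hv' : ∀ m : Nat, i + (n + 1) ≤ m → valid.contains (m : Int) = false :=
      fun m hm => hv m (by omega)
    have hne : ∀ m : Nat, i + (n + 1) ≤ m → ((m : Int) == (i : Int)) = false := by
      intro m hm
      exact beq_eq_false_iff_ne.mpr (fun hEq => by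
        have : m = i := by exact_mod_cast hEq
        omega)
    rw [pvBruns, dif_pos hlt, hn]
    cases ht : (PySem.List.pyGetD lat (i : Int) none).isNone with
    | true =>
      have hstop : i + (n + 1) = lat.length ∨
          (PySem.List.pyGetD lat ((i + (n + 1) : Nat) : Int) none).isNone = false := by
        rcases Nat.eq_or_lt_of_le hj2 with h | h
        · exact Or.inl h
        · right
          have h2 := hstop0 h
          rw [ht] at h2
          cases hb : (PySem.List.pyGetD lat ((i + (n + 1) : Nat) : Int) none).isNone
          · rfl
          · exact absurd hb h2
      have hrun' : ∀ m, i ≤ m → m < i + n + 1 →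
          (PySem.List.pyGetD lat (m : Int) none).isNone = true :=
        fun m h1 h2 => (hrun m h1 (by omega)).trans ht
      have hrn := pvA_run_none time lat (i : Int) n i valid invalid (by omega) hrun'
        (by rw [show i + n + 1 = i + (n + 1) from by omega]; exact hstop)
      rw [show i + n + 1 = i + (n + 1) from by omega] at hrn
      rw [hrn, PySem.Dict.getD_of_not_contains _ _ (hiv i le_rfl)]
      simp only [List.getD_cons_zero, List.getD_cons_succ, List.nil_append]
      have hiv' : ∀ m : Nat, i + (n + 1) ≤ m →
          (invalid.insert (i : Int)
            [List.replicate (n + 1) 0,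
             (List.range (n + 1)).map (fun m => time.getD (i + m) 0)]).contains (m : Int) = false := by
        intro m hm
        rw [PySem.Dict.contains_insert, hne m hm, Bool.false_or]
        exact hiv m (by omega)
      have hrec := pvMain time lat (i + (n + 1)) valid _ hj2 hv' hiv'
      rw [hrec]
      simp only [pvBfill, List.foldl_cons, ht, if_pos]
      rw [show i + (n + 1) - i = n + 1 from by omega,
        pvRangeMap (fun k => PySem.List.pyGetD time k 0) i (n + 1)]
      simp only [PySem.List.pyGetD_natCast]
    | false =>
      have hstop : i + (n + 1) = lat.length ∨
          (PySem.List.pyGetD lat ((i + (n + 1) : Nat) : Int) none).isNone = true := by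
        rcases Nat.eq_or_lt_of_le hj2 with h | h
        · exact Or.inl h
        · right
          have h2 := hstop0 h
          rw [ht] at h2
          cases hb : (PySem.List.pyGetD lat ((i + (n + 1) : Nat) : Int) none).isNone
          · exact absurd hb h2
          · rfl
      have hrun' : ∀ m, i ≤ m → m < i + n + 1 →
          (PySem.List.pyGetD lat (m : Int) none).isNone = false :=
        fun m h1 h2 => (hrun m h1 (by omega)).trans ht
      have hrn := pvA_run_some time lat (i : Int) n i valid invalid (by omega) hrun'
        (by rw [show i + n + 1 = i + (n + 1) from by omega]; exact hstop)
      rw [show i + n + 1 = i + (n + 1) from by omega] at hrn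
      rw [hrn, PySem.Dict.getD_of_not_contains _ _ (hv i le_rfl)]
      simp only [List.getD_cons_zero, List.getD_cons_succ, List.nil_append]
      have hv2 : ∀ m : Nat, i + (n + 1) ≤ m →
          (valid.insert (i : Int)
            [(List.range (n + 1)).map (fun m => (lat.getD (i + m) none).getD 0),
             (List.range (n + 1)).map (fun m => time.getD (i + m) 0)]).contains (m : Int) = false := by
        intro m hm
        rw [PySem.Dict.contains_insert, hne m hm, Bool.false_or]
        exact hv m (by omega)
      have hiv' : ∀ m : Nat, i + (n + 1) ≤ m → invalid.contains (m : Int) = false :=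
        fun m hm => hiv m (by omega)
      have hrec := pvMain time lat (i + (n + 1)) _ invalid hj2 hv2 hiv'
      rw [hrec]
      simp only [pvBfill, List.foldl_cons, ht, Bool.false_eq_true, if_false]
      rw [PySem.List.slice_natCast, show i + (n + 1) - i = n + 1 from by omega,
        pvSliceMap lat i (n + 1) hj2, List.map_map,
        pvRangeMap (fun k => PySem.List.pyGetD time k 0) i (n + 1)]
      simp only [PySem.List.pyGetD_natCast, Function.comp_def]
  · have hge : lat.length ≤ i := by omega
    rw [pvBruns, dif_neg hlt, List.drop_eq_nil_of_le hge]
    rfl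
termination_by lat.length - i
decreasing_by all_goals omega

-- ===== VERDICT (by name: the statement is the Claim_ definition above) =====
theorem process_latencies_spec : Claim_equal_process_latencies := by
  intro latencies time_num _ _
  unfold Spec_process_latencies process_latencies process_latencies_alt
  have h := pvMain time_num latencies 0 PySem.Dict.empty PySem.Dict.empty
    (Nat.zero_le _) (fun m _ => PySem.Dict.contains_empty _) (fun m _ => PySem.Dict.contains_empty _)
  simp only [List.drop_zero, Nat.cast_zero] at h
  rw [h]
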